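-- pv_equiv track=rewrite | github.com/sungjaeshim/ai-productivity-lab | scripts/memory_gate_report.py | latest_per_day
-- ===== SOURCE A (Python) =====
-- def latest_per_day(rows):
--     by_date = {}
--     for row in rows:
--         ts = row.get('timestamp') or ''
--         date_key = ts[:10]
--         if not date_key:
--             continue
--         prev = by_date.get(date_key)
--         if not prev or ts >= (prev.get('timestamp') or ''):
--             by_date[date_key] = row
--     return [by_date[key] for key in sorted(by_date)]
-- ===== SOURCE B (Python) =====
-- def latest_per_day(rows):
--     dates = sorted({(r.get('timestamp') or '')[:10]
--                     for r in rows if (r.get('timestamp') or '')[:10]})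
--     out = []
--     for d in dates:
--         best = None
--         for r in rows:
--             ts = r.get('timestamp') or ''
--             if ts[:10] == d and (best is None or ts >= (best.get('timestamp') or '')):
--                 best = r
--         out.append(best)
--     return out
-- ===== Notes on version B (the rewrite author's own statement) =====
-- stated objective: alternative
-- what changed: B drops A's running-best dict entirely: it first computes the sorted set of distinct nonempty date keys, then for each date rescans the rows to pick that day's maximal-timestamp row (ties to the later row), instead of A's single pass maintaining one best row per date in a dict.
import Mathlib
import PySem

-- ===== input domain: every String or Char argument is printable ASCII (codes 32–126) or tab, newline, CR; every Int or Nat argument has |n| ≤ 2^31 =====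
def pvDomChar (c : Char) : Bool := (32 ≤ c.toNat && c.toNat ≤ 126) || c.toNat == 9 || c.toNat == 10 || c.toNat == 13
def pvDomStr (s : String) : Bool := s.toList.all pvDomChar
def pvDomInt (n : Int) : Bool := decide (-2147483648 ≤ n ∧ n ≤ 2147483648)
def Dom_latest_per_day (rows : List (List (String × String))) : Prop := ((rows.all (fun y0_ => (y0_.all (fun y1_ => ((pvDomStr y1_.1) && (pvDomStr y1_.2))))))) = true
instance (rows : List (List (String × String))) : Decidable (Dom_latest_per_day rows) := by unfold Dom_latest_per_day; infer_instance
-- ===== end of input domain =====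

-- B replaces A's single streaming pass with a running best-row dict by a two-stage plan:
-- collect the sorted set of distinct date keys first, then for each date re-scan the rows
-- for that day's maximal-timestamp row (alternative decomposition, not faster).

-- ===== PORT A =====
-- row.get('timestamp') or ''  (dict lookup is first match in the association list; 'or' maps a falsy "" to "")
def pvTs (row : List (String × String)) : String :=
  ((row.find? (fun p => p.1 == "timestamp")).map (fun p => p.2)).getD ""

-- loop body of A: ts = …; date_key = ts[:10]; skip if empty; keep row if no prev, falsy prev, or ts >= prev's ts
def pvStepA (d : PySem.Dict String (List (String × String))) (row : List (String × String)) :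
    PySem.Dict String (List (String × String)) :=
  let ts := pvTs row
  let dateKey := PySem.Str.slice ts none (some 10)
  if dateKey = "" then d
  else
    match d.get? dateKey with
    | none => d.insert dateKey row
    | some prev => if prev = [] ∨ pvTs prev ≤ ts then d.insert dateKey row else d

def latest_per_day (rows : List (List (String × String))) : List (List (String × String)) :=
  let byDate := rows.foldl pvStepA PySem.Dict.empty
  (PySem.List.sorted byDate.keys (fun k => k) false).map (fun k => byDate.getD k [])

-- ===== PORT B =====
-- r.get('timestamp') or ''  (written as an explicit match; 'or' maps a falsy "" to "")
def pvTsB (r : List (String × String)) : String :=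
  match r.find? (fun p => p.1 == "timestamp") with
  | some p => p.2
  | none => ""

-- ts[:10]
def pvDkB (r : List (String × String)) : String :=
  PySem.Str.slice (pvTsB r) none (some 10)

-- body of B's inner loop: if ts[:10] == d and (best is None or ts >= best's ts): best = r
def pvPick (d : String) (best : Option (List (String × String)))
    (r : List (String × String)) : Option (List (String × String)) :=
  if pvDkB r = d then
    match best with
    | none => some r
    | some b => if pvTsB b ≤ pvTsB r then some r else some b
  else best

-- B: sorted set of nonempty date keys, then one scan of rows per date; for d in dates the
-- inner loop always finds a row, so best is some _ and the unreachable none case yields [].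
def latest_per_day_alt (rows : List (List (String × String))) : List (List (String × String)) :=
  let dates := PySem.List.sorted
    (PySem.Set.ofList (rows.filterMap (fun r => if pvDkB r = "" then none else some (pvDkB r))))
    (fun k => k) false
  dates.map (fun d => (rows.foldl (pvPick d) none).getD [])

-- ===== PRECONDITION & SPEC =====
def Spec_latest_per_day (rows : List (List (String × String))) (out : List (List (String × String))) : Prop := out = latest_per_day_alt rows
instance (rows : List (List (String × String))) (out : List (List (String × String))) : Decidable (Spec_latest_per_day rows out) := by unfold Spec_latest_per_day; infer_instance

-- ===== CLAIM (what is proved, stated in full; the proofs are below) =====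
def Claim_equal_latest_per_day : Prop := ∀ (rows : List (List (String × String))), Dom_latest_per_day rows → Spec_latest_per_day rows (latest_per_day rows)

-- ===== LEMMAS AND PROOFS =====

-- both ports read the same timestamp
theorem pvTsB_eq (r : List (String × String)) : pvTsB r = pvTs r := by
  unfold pvTsB pvTs
  cases r.find? (fun p => p.1 == "timestamp") <;> rfl

-- the empty string is the least string
theorem pvEmpty_le (s : String) : "" ≤ s := by
  rw [String.le_iff_toList_le]
  cases h : s.toList
  · simp
  · exact le_of_lt (by show "".toList < _; simp)

theorem pvTs_nil : pvTs [] = "" := rfl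

-- one step of A, seen through get? at a fixed nonempty date d, is B's inner-loop body
theorem pvStepA_get? (dA : PySem.Dict String (List (String × String)))
    (r : List (String × String)) (d : String) (hd : d ≠ "") :
    (pvStepA dA r).get? d = pvPick d (dA.get? d) r := by
  unfold pvStepA pvPick
  simp only [pvDkB, pvTsB_eq]
  by_cases h0 : PySem.Str.slice (pvTs r) none (some 10) = ""
  · rw [if_pos h0, if_neg (fun h => hd (h0 ▸ h.symm))]
  · rw [if_neg h0]
    by_cases hdk : PySem.Str.slice (pvTs r) none (some 10) = d
    · subst hdk
      rw [if_pos rfl]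
      cases hg : dA.get? (PySem.Str.slice (pvTs r) none (some 10)) with
      | none => simp only [PySem.Dict.get?_insert_self]
      | some prev =>
          dsimp only
          by_cases hc : prev = [] ∨ pvTs prev ≤ pvTs r
          · have hle : pvTs prev ≤ pvTs r := by
              rcases hc with hc | hc
              · rw [hc, pvTs_nil]; exact pvEmpty_le _
              · exact hc
            rw [if_pos hc, if_pos hle, PySem.Dict.get?_insert_self]
          · have hc2 : ¬ pvTs prev ≤ pvTs r := fun hle => hc (Or.inr hle)
            rw [if_neg hc, if_neg hc2, hg]
    · have hne : d ≠ PySem.Str.slice (pvTs r) none (some 10) := fun h => hdk h.symm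
      rw [if_neg hdk]
      cases hg : dA.get? (PySem.Str.slice (pvTs r) none (some 10)) with
      | none => simp only [PySem.Dict.get?_insert, if_neg hne]
      | some prev =>
          dsimp only
          by_cases hc : prev = [] ∨ pvTs prev ≤ pvTs r
          · rw [if_pos hc, PySem.Dict.get?_insert, if_neg hne]
          · rw [if_neg hc]

-- A's whole fold, at a fixed nonempty date d, is B's inner-loop fold
theorem pvGetInv (rows : List (List (String × String))) (d : String) (hd : d ≠ "") :
    ∀ dA, (rows.foldl pvStepA dA).get? d = rows.foldl (pvPick d) (dA.get? d) := by
  induction rows with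
  | nil => intro dA; rfl
  | cons r rest ih =>
      intro dA
      simp only [List.foldl_cons]
      rw [ih, pvStepA_get? dA r d hd]

-- one step of A on the key list is a Set.add of the (nonempty) date key
theorem pvStepA_keys (dA : PySem.Dict String (List (String × String)))
    (r : List (String × String)) :
    (pvStepA dA r).keys =
      if pvDkB r = "" then dA.keys else PySem.Set.add dA.keys (pvDkB r) := by
  unfold pvStepA
  rw [pvDkB, pvTsB_eq]
  by_cases h0 : PySem.Str.slice (pvTs r) none (some 10) = ""
  · simp [h0]
  · rw [if_neg h0, if_neg h0]
    set dk := PySem.Str.slice (pvTs r) none (some 10) with hdk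
    cases hg : dA.get? dk with
    | none =>
        have hc : dA.contains dk = false := (PySem.Dict.get?_eq_none_iff_contains dA dk).mp hg
        rw [PySem.Dict.keys_insert_of_not_contains dA _ hc]
        unfold PySem.Set.add
        rw [if_neg (by
          intro hmem
          rw [PySem.Dict.contains_eq_decide_mem_keys] at hc
          simp only [decide_eq_false_iff_not] at hc
          exact hc (by simpa [PySem.Set.contains] using hmem))]
    | some prev =>
        have hc : dA.contains dk = true := by
          rw [PySem.Dict.contains_eq_isSome_get?, hg]; rfl
        have hmem : PySem.Set.contains dA.keys dk = true := by
          rw [PySem.Dict.contains_eq_decide_mem_keys] at hc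
          simp only [decide_eq_true_eq] at hc
          simpa [PySem.Set.contains] using hc
        have hadd : PySem.Set.add dA.keys dk = dA.keys := by
          unfold PySem.Set.add; rw [if_pos hmem]
        dsimp only
        split_ifs with _
        · rw [PySem.Dict.keys_insert_of_contains dA _ hc, hadd]
        · rw [hadd]

-- A's whole fold produces exactly the set of nonempty date keys, in first-occurrence order
theorem pvKeysInv (rows : List (List (String × String))) :
    ∀ (dA : PySem.Dict String (List (String × String))),
      (rows.foldl pvStepA dA).keys =
        (rows.filterMap (fun r => if pvDkB r = "" then none else some (pvDkB r))).foldl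
          PySem.Set.add dA.keys := by
  induction rows with
  | nil => intro dA; rfl
  | cons r rest ih =>
      intro dA
      simp only [List.foldl_cons, List.filterMap_cons]
      rw [ih, pvStepA_keys]
      by_cases h0 : pvDkB r = "" <;> simp [h0]

-- ===== VERDICT (by name: the statement is the Claim_ definition above) =====
theorem latest_per_day_spec : Claim_equal_latest_per_day := by
  intro rows _
  show latest_per_day rows = latest_per_day_alt rows
  have hkeys : (rows.foldl pvStepA PySem.Dict.empty).keys =
      PySem.Set.ofList (rows.filterMap (fun r => if pvDkB r = "" then none else some (pvDkB r))) := by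
    rw [pvKeysInv rows PySem.Dict.empty, PySem.Set.ofList_eq_foldl]
    rfl
  show (PySem.List.sorted (rows.foldl pvStepA PySem.Dict.empty).keys (fun k => k) false).map
      (fun k => (rows.foldl pvStepA PySem.Dict.empty).getD k []) =
    (PySem.List.sorted
      (PySem.Set.ofList (rows.filterMap (fun r => if pvDkB r = "" then none else some (pvDkB r))))
      (fun k => k) false).map (fun d => (rows.foldl (pvPick d) none).getD [])
  rw [hkeys]
  apply List.map_congr_left
  intro d hdmem
  have hdset : d ∈ PySem.Set.ofList
      (rows.filterMap (fun r => if pvDkB r = "" then none else some (pvDkB r))) :=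
    (PySem.List.mem_sorted _ _ _ _).mp hdmem
  have hd : d ≠ "" := by
    have hl : d ∈ rows.filterMap (fun r => if pvDkB r = "" then none else some (pvDkB r)) :=
      (PySem.Set.mem_ofList _ _).mp hdset
    obtain ⟨r, _, hr⟩ := List.mem_filterMap.mp hl
    by_cases h0 : pvDkB r = "" <;> simp [h0] at hr
    exact hr ▸ h0
  rw [PySem.Dict.getD_eq_get?_getD, pvGetInv rows d hd PySem.Dict.empty]
  rfl
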